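-- pv_equiv track=rewrite | github.com/pypi-data/pypi-code-47 | ad1459/ad1459-1.11.0-py3-none-any.whl/formatting.py | fix_markedup_tags
-- ===== SOURCE A (Python) =====
-- def fix_markedup_tags(text):
--     mu_formatting = {
--         '&#x2;': '\x02',
--         #'\u0003': #'\u0003',
--         #'\u000F': #'\u000F',
--         '&#x1d;': '\x1D',
--         '&#x1f;': '\x1F'
--     }
--
--     for i in mu_formatting:
--         text = text.replace(i, mu_formatting[i])
--
--     return text
-- ===== SOURCE B (Python) =====
-- def fix_markedup_tags(text):
--     # Single left-to-right scan: at each position try the three markers in order,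
--     # instead of one full .replace pass per marker.
--     markers = (('&#x2;', '\x02'), ('&#x1d;', '\x1D'), ('&#x1f;', '\x1F'))
--     out = []
--     i = 0
--     n = len(text)
--     while i < n:
--         for k, v in markers:
--             if text.startswith(k, i):
--                 out.append(v)
--                 i += len(k)
--                 break
--         else:
--             out.append(text[i])
--             i += 1
--     return ''.join(out)
-- ===== Notes on version B (the rewrite author's own statement) =====
-- stated objective: alternative
-- what changed: A makes three sequential full-string str.replace passes, one per markup marker; B makes a single left-to-right scan that at each position tries the three markers with startswith, emits the control char and skips the marker, or copies the character.
import Mathlib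
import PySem

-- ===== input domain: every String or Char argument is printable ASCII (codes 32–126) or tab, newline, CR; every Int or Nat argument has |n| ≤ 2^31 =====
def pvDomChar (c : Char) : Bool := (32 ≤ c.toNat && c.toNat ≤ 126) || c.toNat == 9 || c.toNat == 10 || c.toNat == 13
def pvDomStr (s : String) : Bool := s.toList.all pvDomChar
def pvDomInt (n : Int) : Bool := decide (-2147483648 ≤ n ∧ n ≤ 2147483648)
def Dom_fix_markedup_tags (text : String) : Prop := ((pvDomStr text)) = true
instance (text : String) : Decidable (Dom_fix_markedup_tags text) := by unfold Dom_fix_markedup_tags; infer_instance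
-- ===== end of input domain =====

-- B replaces A's three sequential str.replace passes by one left-to-right scan that
-- dispatches each marker where it occurs (objective: alternative single-pass strategy).


-- ===== PORT A =====
def fix_markedup_tags (text : String) : String :=
  let mu : PySem.Dict String String :=
    (((PySem.Dict.empty).insert "&#x2;" "\u0002").insert "&#x1d;" "\u001D").insert "&#x1f;" "\u001F"
  mu.keys.foldl (fun t i => PySem.Str.replace t i (mu.getD i "")) text

-- ===== PORT B =====
-- the three markup markers, in B's dispatch order
def pvK1 : List Char := ['&', '#', 'x', '2', ';']
def pvK2 : List Char := ['&', '#', 'x', '1', 'd', ';']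
def pvK3 : List Char := ['&', '#', 'x', '1', 'f', ';']

-- B's while-loop: one pass, at each position try the markers in order (startswith),
-- emit the control char and skip the marker, else copy the char.
def fixGo : List Char → List Char
  | [] => []
  | c :: rest =>
    if pvK1.isPrefixOf (c :: rest) then '\u0002' :: fixGo (rest.drop 4)
    else if pvK2.isPrefixOf (c :: rest) then '\u001D' :: fixGo (rest.drop 5)
    else if pvK3.isPrefixOf (c :: rest) then '\u001F' :: fixGo (rest.drop 5)
    else c :: fixGo rest
  termination_by l => l.length
  decreasing_by
    · simp only [List.length_cons, List.length_drop]; omega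
    · simp only [List.length_cons, List.length_drop]; omega
    · simp only [List.length_cons, List.length_drop]; omega
    · simp

def fix_markedup_tags_alt (text : String) : String := String.ofList (fixGo text.toList)

-- ===== PRECONDITION & SPEC =====
def Spec_fix_markedup_tags (text : String) (out : String) : Prop := out = fix_markedup_tags_alt text
instance (text : String) (out : String) : Decidable (Spec_fix_markedup_tags text out) := by unfold Spec_fix_markedup_tags; infer_instance

-- ===== CLAIM (what is proved, stated in full; the proofs are below) =====
def Claim_equal_fix_markedup_tags : Prop := ∀ (text : String), Dom_fix_markedup_tags text → Spec_fix_markedup_tags text (fix_markedup_tags text)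

-- ===== LEMMAS AND PROOFS =====

-- clean structural form of PySem.Chars.replace (for nonempty `old`)
def repl (old new : List Char) : List Char → List Char
  | [] => []
  | c :: t =>
    if old.isPrefixOf (c :: t) then new ++ repl old new (t.drop (old.length - 1))
    else c :: repl old new t
  termination_by l => l.length
  decreasing_by
    · simp only [List.length_cons, List.length_drop]; omega
    · simp

theorem go_eq_repl (old new : List Char) (hold : old ≠ []) :
    ∀ (fuel : Nat) (l acc : List Char), l.length ≤ fuel →
      PySem.Chars.replace.go old new fuel l acc = acc.reverse ++ repl old new l := by
  intro fuel
  induction fuel with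
  | zero =>
    intro l acc hl
    have : l = [] := by cases l <;> simp_all
    subst this
    simp [PySem.Chars.replace.go, repl]
  | succ fuel ih =>
    intro l acc hl
    cases l with
    | nil => simp [PySem.Chars.replace.go, repl]
    | cons c t =>
      rw [PySem.Chars.replace.go]
      by_cases h : old.isPrefixOf (c :: t) = true
      · rw [if_pos h]
        obtain ⟨m, hm⟩ : ∃ m, old.length = m + 1 := by
          cases old with
          | nil => exact absurd rfl hold
          | cons a b => exact ⟨b.length, rfl⟩
        have hdrop : (c :: t).drop old.length = t.drop (old.length - 1) := by
          rw [hm]; simp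
        rw [ih ((c :: t).drop old.length) (new.reverse ++ acc)
              (by simp only [List.length_drop, List.length_cons] at *; omega)]
        rw [repl, if_pos h, hdrop]
        simp
      · rw [if_neg h]
        rw [ih t (c :: acc) (by simp at hl ⊢; omega)]
        rw [repl, if_neg h]
        simp

theorem replace_eq_repl (s old new : List Char) (hold : old ≠ []) :
    PySem.Chars.replace s old new = repl old new s := by
  rw [PySem.Chars.replace]
  rw [if_neg (by simp [List.isEmpty_iff, hold])]
  rw [go_eq_repl old new hold s.length s [] le_rfl]
  simp

-- a prefix of `repl old new cs` that avoids every char of `new` is a prefix of `cs`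
theorem prefix_of_repl (old new : List Char) (hnew : new ≠ [])
    (cs p : List Char) (hp : ∀ c ∈ new, c ∉ p) (h : p <+: repl old new cs) :
    p <+: cs := by
  fun_induction repl old new cs generalizing p with
  | case1 =>
    simpa [repl] using h
  | case2 c t hpre ih =>
    cases p with
    | nil => exact List.nil_prefix
    | cons a p' =>
      cases new with
      | nil => exact absurd rfl hnew
      | cons d new' =>
        exact absurd (by simp [(List.cons_prefix_cons.mp h).1]) (hp d (by simp))
  | case3 c t hpre ih =>
    cases p with
    | nil => exact List.nil_prefix
    | cons a p' =>
      obtain ⟨rfl, hp'⟩ := List.cons_prefix_cons.mp h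
      exact List.cons_prefix_cons.mpr
        ⟨rfl, ih p' (fun x hx hm => hp x hx (by simp [hm])) hp'⟩

-- one-pass scan handling only the first two markers (proof intermediate)
def g12 : List Char → List Char
  | [] => []
  | c :: rest =>
    if pvK1.isPrefixOf (c :: rest) then '\u0002' :: g12 (rest.drop 4)
    else if pvK2.isPrefixOf (c :: rest) then '\u001D' :: g12 (rest.drop 5)
    else c :: g12 rest
  termination_by l => l.length
  decreasing_by
    · simp only [List.length_cons, List.length_drop]; omega
    · simp only [List.length_cons, List.length_drop]; omega
    · simp

-- a prefix of `g12 cs` that avoids the two emitted control chars is a prefix of `cs`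
theorem prefix_of_g12 (cs p : List Char) (h2 : '\u0002' ∉ p) (h29 : '\u001D' ∉ p)
    (h : p <+: g12 cs) : p <+: cs := by
  fun_induction g12 cs generalizing p with
  | case1 => simpa [g12] using h
  | case2 c rest hpre ih =>
    cases p with
    | nil => exact List.nil_prefix
    | cons a p' =>
      exact absurd (by simp [(List.cons_prefix_cons.mp h).1]) h2
  | case3 c rest h1 hpre ih =>
    cases p with
    | nil => exact List.nil_prefix
    | cons a p' =>
      exact absurd (by simp [(List.cons_prefix_cons.mp h).1]) h29
  | case4 c rest h1 hpre ih =>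
    cases p with
    | nil => exact List.nil_prefix
    | cons a p' =>
      obtain ⟨rfl, hp'⟩ := List.cons_prefix_cons.mp h
      exact List.cons_prefix_cons.mpr
        ⟨rfl, ih p' (fun hm => h2 (by simp [hm])) (fun hm => h29 (by simp [hm])) hp'⟩

theorem stage2 (cs : List Char) :
    repl pvK2 ['\u001D'] (repl pvK1 ['\u0002'] cs) = g12 cs := by
  fun_induction g12 cs with
  | case1 => simp [repl]
  | case2 c rest hpre ih =>
    obtain ⟨w, hw⟩ := List.isPrefixOf_iff_prefix.mp hpre
    simp only [pvK1, List.cons_append, List.nil_append, List.cons.injEq] at hw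
    obtain ⟨hc, hr⟩ := hw
    subst hc; subst hr
    simp only [List.drop_succ_cons, List.drop_zero] at ih ⊢
    simp only [pvK1, pvK2] at ih
    simp [repl, pvK1, pvK2]
    exact ih
  | case3 c rest h1 hpre ih =>
    obtain ⟨w, hw⟩ := List.isPrefixOf_iff_prefix.mp hpre
    simp only [pvK2, List.cons_append, List.nil_append, List.cons.injEq] at hw
    obtain ⟨hc, hr⟩ := hw
    subst hc; subst hr
    simp only [List.drop_succ_cons, List.drop_zero] at ih ⊢
    simp only [pvK1, pvK2] at ih
    simp [repl, pvK1, pvK2]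
    exact ih
  | case4 c rest h1 hp2 ih =>
    have e1 : repl pvK1 ['\u0002'] (c :: rest) = c :: repl pvK1 ['\u0002'] rest := by
      rw [repl, if_neg h1]
    have hfalse : ¬ pvK2.isPrefixOf (c :: repl pvK1 ['\u0002'] rest) = true := by
      intro hcon
      have hpre2 : pvK2 <+: c :: repl pvK1 ['\u0002'] rest :=
        List.isPrefixOf_iff_prefix.mp hcon
      simp only [pvK2] at hpre2
      obtain ⟨rfl, htail⟩ := List.cons_prefix_cons.mp hpre2
      have hrest := prefix_of_repl pvK1 ['\u0002'] (by simp) rest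
        ['#', 'x', '1', 'd', ';'] (by simp) htail
      apply hp2
      apply List.isPrefixOf_iff_prefix.mpr
      show ['&', '#', 'x', '1', 'd', ';'] <+: '&' :: rest
      exact List.cons_prefix_cons.mpr ⟨rfl, hrest⟩
    rw [e1, repl, if_neg hfalse, ih]

theorem stage3 (cs : List Char) :
    repl pvK3 ['\u001F'] (g12 cs) = fixGo cs := by
  fun_induction fixGo cs with
  | case1 => simp [repl, g12]
  | case2 c rest hpre ih =>
    have e : g12 (c :: rest) = '\u0002' :: g12 (rest.drop 4) := by
      rw [g12, if_pos hpre]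
    rw [e, repl, if_neg (by simp [pvK3, List.isPrefixOf]), ih]
  | case3 c rest h1 hpre ih =>
    have e : g12 (c :: rest) = '\u001D' :: g12 (rest.drop 5) := by
      rw [g12, if_neg h1, if_pos hpre]
    rw [e, repl, if_neg (by simp [pvK3, List.isPrefixOf]), ih]
  | case4 c rest h1 h2 hpre ih =>
    obtain ⟨w, hw⟩ := List.isPrefixOf_iff_prefix.mp hpre
    simp only [pvK3, List.cons_append, List.nil_append, List.cons.injEq] at hw
    obtain ⟨hc, hr⟩ := hw
    subst hc; subst hr
    simp only [List.drop_succ_cons, List.drop_zero] at ih ⊢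
    simp only [pvK3] at ih
    simp [repl, g12, pvK1, pvK2, pvK3]
    exact ih
  | case5 c rest h1 h2 h3 ih =>
    have e : g12 (c :: rest) = c :: g12 rest := by
      rw [g12, if_neg h1, if_neg h2]
    have hfalse : ¬ pvK3.isPrefixOf (c :: g12 rest) = true := by
      intro hcon
      have hpre3 : pvK3 <+: c :: g12 rest := List.isPrefixOf_iff_prefix.mp hcon
      simp only [pvK3] at hpre3
      obtain ⟨rfl, htail⟩ := List.cons_prefix_cons.mp hpre3
      have hrest := prefix_of_g12 rest ['#', 'x', '1', 'f', ';'] (by simp) (by simp) htail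
      apply h3
      apply List.isPrefixOf_iff_prefix.mpr
      show ['&', '#', 'x', '1', 'f', ';'] <+: '&' :: rest
      exact List.cons_prefix_cons.mpr ⟨rfl, hrest⟩
    rw [e, repl, if_neg hfalse, ih]

theorem main_list (cs : List Char) :
    repl pvK3 ['\u001F'] (repl pvK2 ['\u001D'] (repl pvK1 ['\u0002'] cs)) = fixGo cs := by
  rw [stage2, stage3]

-- ===== VERDICT (by name: the statement is the Claim_ definition above) =====
theorem fix_markedup_tags_spec : Claim_equal_fix_markedup_tags := by
  intro text _
  unfold Spec_fix_markedup_tags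
  have hA : fix_markedup_tags text =
      PySem.Str.replace (PySem.Str.replace (PySem.Str.replace text "&#x2;" "\u0002")
        "&#x1d;" "\u001D") "&#x1f;" "\u001F" := rfl
  have hlist : (fix_markedup_tags text).toList = (fix_markedup_tags_alt text).toList := by
    rw [hA]
    simp only [PySem.Str.toList_replace]
    rw [replace_eq_repl _ _ _ (by decide), replace_eq_repl _ _ _ (by decide),
      replace_eq_repl _ _ _ (by decide)]
    have k1 : "&#x2;".toList = pvK1 := by decide
    have k2 : "&#x1d;".toList = pvK2 := by decide
    have k3 : "&#x1f;".toList = pvK3 := by decide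
    have v1 : "\u0002".toList = ['\u0002'] := by decide
    have v2 : "\u001D".toList = ['\u001D'] := by decide
    have v3 : "\u001F".toList = ['\u001F'] := by decide
    rw [k1, k2, k3, v1, v2, v3, main_list]
    simp [fix_markedup_tags_alt]
  exact String.toList_inj.mp hlist
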